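-- pv_equiv track=rewrite | github.com/ShinhyeongPark/Algorithm | Level2/완전탐색1.py | solution
-- ===== SOURCE A (Python) =====
-- def solution(answers):
--     method1 = [1, 2, 3, 4, 5]
--     method2 = [2, 1, 2, 3, 2, 4, 2, 5]
--     method3 = [3, 3, 1, 1, 2, 2, 4, 4, 5, 5]
--
--     method1 = func1(method1, answers)
--     method2 = func1(method2, answers)
--     method3 = func1(method3, answers)
--
--     ansLen = len(answers)
--     count1 = func2(method1, answers, ansLen)
--     count2 = func2(method2, answers, ansLen)
--     count3 = func2(method3, answers, ansLen)
--
--     students = [count1, count2, count3]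
--     maxScore = max(students)
--     answer = []
--     for idx in range(0, 3):
--         if students[idx] == maxScore:
--             answer.append(idx+1)
--
--     return answer
--
-- def func1(prob, answer):
--     while len(prob) < len(answer):
--         prob += prob
--
--     return prob
--
-- def func2(prob, ans, ansLen):
--     count = 0
--     for idx in range(ansLen):
--         if prob[idx] == ans[idx]:
--             count += 1
--     return count
-- ===== SOURCE B (Python) =====
-- def solution(answers):
--     m1 = [1, 2, 3, 4, 5]
--     m2 = [2, 1, 2, 3, 2, 4, 2, 5]
--     m3 = [3, 3, 1, 1, 2, 2, 4, 4, 5, 5]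
--     c1 = c2 = c3 = 0
--     for i, a in enumerate(answers):
--         if a == m1[i % 5]:
--             c1 += 1
--         if a == m2[i % 8]:
--             c2 += 1
--         if a == m3[i % 10]:
--             c3 += 1
--     best = max(c1, c2, c3)
--     return [idx + 1 for idx, c in enumerate((c1, c2, c3)) if c == best]
-- ===== Notes on version B (the rewrite author's own statement) =====
-- stated objective: idiomatic
-- what changed: Replaced A's pattern-list doubling (func1) plus three separate index-loop counting passes (func2) by a single fused pass over enumerate(answers) using modulo indexing into the three fixed base patterns, followed by a comprehension selecting the argmax indices.
import Mathlib
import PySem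

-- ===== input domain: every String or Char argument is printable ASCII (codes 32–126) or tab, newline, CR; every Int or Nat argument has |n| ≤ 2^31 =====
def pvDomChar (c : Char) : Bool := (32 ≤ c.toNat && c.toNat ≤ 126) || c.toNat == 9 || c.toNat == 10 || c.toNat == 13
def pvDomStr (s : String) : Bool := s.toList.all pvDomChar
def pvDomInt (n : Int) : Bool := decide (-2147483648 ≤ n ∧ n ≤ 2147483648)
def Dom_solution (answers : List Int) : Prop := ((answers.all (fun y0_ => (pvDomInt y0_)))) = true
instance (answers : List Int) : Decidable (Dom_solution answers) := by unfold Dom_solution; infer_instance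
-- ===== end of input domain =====

-- B replaces A's pattern-doubling (func1) and three counting passes (func2) by one fused
-- pass over enumerate(answers) with modulo indexing into the three fixed base patterns
-- (objective: idiomatic; avoids materialising the tripled pattern lists).

-- ===== PORT A =====
-- func1's while loop: the length doubles each pass, so answer.length passes always
-- suffice when prob is nonempty (A only calls it on nonempty literals); the fuel is
-- only a termination guard and is never exhausted in A's flow.
def func1Aux : Nat → List Int → List Int → List Int
  | 0, prob, _ => prob
  | fuel+1, prob, answer =>
      if prob.length < answer.length then func1Aux fuel (prob ++ prob) answer else prob

def func1 (prob answer : List Int) : List Int := func1Aux answer.length prob answer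

-- prob[idx] / ans[idx]: every idx from range(ansLen) is in range in A's flow,
-- so pyGetD (whose default is never used) is exact here.
def func2 (prob ans : List Int) (ansLen : Int) : Int :=
  (PySem.List.pyRange 0 ansLen 1).foldl
    (fun count idx =>
      if PySem.List.pyGetD prob idx 0 = PySem.List.pyGetD ans idx 0 then count + 1 else count) 0

def solution (answers : List Int) : List Int :=
  let method1 := func1 [1, 2, 3, 4, 5] answers
  let method2 := func1 [2, 1, 2, 3, 2, 4, 2, 5] answers
  let method3 := func1 [3, 3, 1, 1, 2, 2, 4, 4, 5, 5] answers
  let ansLen : Int := answers.length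
  let count1 := func2 method1 answers ansLen
  let count2 := func2 method2 answers ansLen
  let count3 := func2 method3 answers ansLen
  let students := [count1, count2, count3]
  -- max(students): students is a nonempty literal, so Python's max never raises
  let maxScore := (PySem.List.max? students (fun y => y)).getD 0
  (PySem.List.pyRange 0 3 1).foldl
    (fun answer idx =>
      if PySem.List.pyGetD students idx 0 = maxScore then answer ++ [idx + 1] else answer) []

-- ===== PORT B =====
def solution_alt (answers : List Int) : List Int :=
  let m1 : List Int := [1, 2, 3, 4, 5]
  let m2 : List Int := [2, 1, 2, 3, 2, 4, 2, 5]
  let m3 : List Int := [3, 3, 1, 1, 2, 2, 4, 4, 5, 5]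
  let c := (PySem.List.enumerate answers 0).foldl
    (fun (c : Int × Int × Int) p =>
      ((if p.2 = PySem.List.pyGetD m1 (PySem.Int.mod p.1 5) 0 then c.1 + 1 else c.1),
       (if p.2 = PySem.List.pyGetD m2 (PySem.Int.mod p.1 8) 0 then c.2.1 + 1 else c.2.1),
       (if p.2 = PySem.List.pyGetD m3 (PySem.Int.mod p.1 10) 0 then c.2.2 + 1 else c.2.2)))
    (0, 0, 0)
  let best := max c.1 (max c.2.1 c.2.2)
  (PySem.List.enumerate [c.1, c.2.1, c.2.2] 0).filterMap
    (fun p => if p.2 = best then some (p.1 + 1) else none)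

-- ===== PRECONDITION & SPEC =====
def Spec_solution (answers : List Int) (out : List Int) : Prop := out = solution_alt answers
instance (answers : List Int) (out : List Int) : Decidable (Spec_solution answers out) := by unfold Spec_solution; infer_instance

-- ===== CLAIM (what is proved, stated in full; the proofs are below) =====
def Claim_equal_solution : Prop := ∀ (answers : List Int), Dom_solution answers → Spec_solution answers (solution answers)

-- ===== LEMMAS AND PROOFS =====
-- flattened replicate is periodic
theorem repFlat_getD (b : List Int) (k j : Nat) (hj : j < k * b.length) :
    ((List.replicate k b).flatten).getD j 0 = b.getD (j % b.length) 0 := by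
  induction k generalizing j with
  | zero => omega
  | succ k ih =>
    rw [List.replicate_succ, List.flatten_cons]
    by_cases h : j < b.length
    · rw [List.getD_append _ _ _ _ h, Nat.mod_eq_of_lt h]
    · have h' : b.length ≤ j := by omega
      rw [List.getD_append_right _ _ _ _ h',
          ih _ (by rw [Nat.succ_mul] at hj; omega), Nat.mod_eq_sub_mod h']

theorem func1Aux_rep (b : List Int) (fuel : Nat) (prob ans : List Int)
    (h : ∃ k, prob = (List.replicate k b).flatten) :
    ∃ k, func1Aux fuel prob ans = (List.replicate k b).flatten := by
  induction fuel generalizing prob with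
  | zero => exact h
  | succ fuel ih =>
    rw [func1Aux]
    split
    · refine ih _ ?_
      obtain ⟨k, rfl⟩ := h
      exact ⟨k + k, by rw [List.replicate_add, List.flatten_append]⟩
    · exact h

theorem func1Aux_len (fuel : Nat) (prob ans : List Int) (h : 1 ≤ prob.length) :
    min ans.length (fuel + prob.length) ≤ (func1Aux fuel prob ans).length := by
  induction fuel generalizing prob with
  | zero => simp [func1Aux]
  | succ fuel ih =>
    rw [func1Aux]
    split
    · have := ih (prob ++ prob) (by simp; omega)
      simp only [List.length_append] at this
      omega
    · omega

theorem func1_spec (b ans : List Int) (hb : b ≠ []) :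
    ans.length ≤ (func1 b ans).length ∧
    ∀ j : Nat, j < ans.length → (func1 b ans).getD j 0 = b.getD (j % b.length) 0 := by
  have hb1 : 1 ≤ b.length := List.length_pos_iff.mpr hb
  obtain ⟨k, hk⟩ := func1Aux_rep b ans.length b ans ⟨1, by simp⟩
  have hk' : func1 b ans = (List.replicate k b).flatten := hk
  have hlen : (func1 b ans).length = k * b.length := by
    rw [hk', List.length_flatten, List.map_replicate, List.sum_replicate, smul_eq_mul]
  have hge : ans.length ≤ (func1 b ans).length := by
    have h := func1Aux_len ans.length b ans hb1
    have heq : func1 b ans = func1Aux ans.length b ans := rfl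
    rw [heq]; omega
  refine ⟨hge, fun j hj => ?_⟩
  rw [hk']
  exact repFlat_getD b k j (by omega)

-- A's counting pass equals the countP over enumerate that B's fused pass computes
theorem count_eq (b ans : List Int) (hb : b ≠ []) :
    func2 (func1 b ans) ans (ans.length : Int) =
    ((PySem.List.enumerate ans 0).countP
      (fun p => decide (p.2 = PySem.List.pyGetD b (PySem.Int.mod p.1 (b.length : Int)) 0)) : Int) := by
  obtain ⟨hge, hper⟩ := func1_spec b ans hb
  rw [func2, PySem.List.foldl_ite_add_one, zero_add,
      PySem.List.enumerate_eq_map_pyRange (d := (0:Int)), List.countP_map]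
  congr 1
  apply List.countP_congr
  intro i hi
  obtain ⟨h0, hn⟩ := (PySem.List.mem_pyRange_one).mp hi
  obtain ⟨j, rfl⟩ : ∃ j : Nat, i = (j : Int) := ⟨i.toNat, (Int.toNat_of_nonneg h0).symm⟩
  have hjn : j < ans.length := by exact_mod_cast hn
  simp only [Function.comp, PySem.List.pyGetD_natCast, PySem.Int.mod_natCast]
  rw [hper j hjn]
  simp only [decide_eq_true_eq]
  exact eq_comm

-- B's fused triple fold computed componentwise
theorem fused_fold (m1 m2 m3 : List Int) (l : List (Int × Int)) (a b c : Int) :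
    l.foldl
      (fun (c : Int × Int × Int) p =>
        ((if p.2 = PySem.List.pyGetD m1 (PySem.Int.mod p.1 5) 0 then c.1 + 1 else c.1),
         (if p.2 = PySem.List.pyGetD m2 (PySem.Int.mod p.1 8) 0 then c.2.1 + 1 else c.2.1),
         (if p.2 = PySem.List.pyGetD m3 (PySem.Int.mod p.1 10) 0 then c.2.2 + 1 else c.2.2)))
      (a, b, c) =
    (a + (l.countP (fun p => decide (p.2 = PySem.List.pyGetD m1 (PySem.Int.mod p.1 5) 0)) : Int),
     b + (l.countP (fun p => decide (p.2 = PySem.List.pyGetD m2 (PySem.Int.mod p.1 8) 0)) : Int),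
     c + (l.countP (fun p => decide (p.2 = PySem.List.pyGetD m3 (PySem.Int.mod p.1 10) 0)) : Int)) := by
  induction l generalizing a b c with
  | nil => simp
  | cons x t ih =>
    simp only [List.foldl_cons, List.countP_cons, ih]
    refine Prod.ext ?_ (Prod.ext ?_ ?_) <;> simp <;> split_ifs <;> ring

set_option maxRecDepth 8192 in
-- common tail: picking the argmax indices from the three counts
theorem tail_eq (c1 c2 c3 : Int) :
    (PySem.List.pyRange 0 3 1).foldl
      (fun answer idx =>
        if PySem.List.pyGetD [c1, c2, c3] idx 0 = (PySem.List.max? [c1, c2, c3] (fun y => y)).getD 0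
        then answer ++ [idx + 1] else answer) [] =
    (PySem.List.enumerate [c1, c2, c3] 0).filterMap
      (fun p => if p.2 = max c1 (max c2 c3) then some (p.1 + 1) else none) := by
  have hr : PySem.List.pyRange 0 3 1 = [0, 1, 2] := by decide
  have g0 : PySem.List.pyGetD [c1, c2, c3] 0 0 = c1 := rfl
  have g1 : PySem.List.pyGetD [c1, c2, c3] 1 0 = c2 := rfl
  have g2 : PySem.List.pyGetD [c1, c2, c3] 2 0 = c3 := rfl
  rw [hr]
  simp only [PySem.List.max?_id_cons, Option.getD_some, List.foldl_cons, List.foldl_nil,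
    PySem.List.enumerate_cons, PySem.List.enumerate_nil, List.filterMap_cons, List.filterMap_nil,
    g0, g1, g2]
  simp only [← max_assoc]
  split_ifs <;> simp

theorem solution_eq_alt : ∀ (answers : List Int), solution answers = solution_alt answers := by
  intro answers
  have h1 := count_eq [1, 2, 3, 4, 5] answers (by decide)
  have h2 := count_eq [2, 1, 2, 3, 2, 4, 2, 5] answers (by decide)
  have h3 := count_eq [3, 3, 1, 1, 2, 2, 4, 4, 5, 5] answers (by decide)
  rw [show (([1, 2, 3, 4, 5] : List Int).length : Int) = 5 from rfl] at h1
  rw [show (([2, 1, 2, 3, 2, 4, 2, 5] : List Int).length : Int) = 8 from rfl] at h2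
  rw [show (([3, 3, 1, 1, 2, 2, 4, 4, 5, 5] : List Int).length : Int) = 10 from rfl] at h3
  simp only [solution, solution_alt, fused_fold, zero_add, h1, h2, h3]
  exact tail_eq _ _ _

-- ===== VERDICT (by name: the statement is the Claim_ definition above) =====
theorem solution_spec : Claim_equal_solution := by
  intro answers _
  exact solution_eq_alt answers
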